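-- pv_equiv track=rewrite | github.com/bong199119/algorithm-test | example/test_example/완전탐색/전력망을 둘로 나누기/solution.py | cal_map
-- ===== SOURCE A (Python) =====
-- def dfs(map_wires, idx_raw, list_tmp_net, list_total_net):
--
--     for idx_col in range(len(map_wires[idx_raw])):
--         if map_wires[idx_raw][idx_col] == 1:
--             map_wires[idx_raw][idx_col] = 0
--
--             if idx_col+1 not in list_tmp_net:
--                 list_tmp_net.append(idx_col+1)
--
--             if idx_col != idx_raw:
--                 dfs(map_wires, idx_col, list_tmp_net, list_total_net)
--
-- def cal_map(map_wires):
--     abs_map = 0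
--     list_total_net = []
--
--     for idx_raw in range(len(map_wires)):
--         list_tmp_net = []
--         dfs(map_wires, idx_raw, list_tmp_net, list_total_net)
--         if list_tmp_net != []:
--             list_total_net.append(list_tmp_net)
--
--     abs_map = abs(len(list_total_net[0]) - len(list_total_net[1]))
--     return abs_map
-- ===== SOURCE B (Python) =====
-- def cal_map(map_wires):
--     list_total_net = []
--     for idx_raw in range(len(map_wires)):
--         list_tmp_net = []
--         stack = [(idx_raw, 0)]
--         while stack:
--             node, col = stack.pop()
--             row = map_wires[node]
--             if col < len(row):
--                 if row[col] == 1: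
--                     row[col] = 0
--                     if col + 1 not in list_tmp_net:
--                         list_tmp_net.append(col + 1)
--                     stack.append((node, col + 1))
--                     if col != node:
--                         stack.append((col, 0))
--                 else:
--                     stack.append((node, col + 1))
--         if list_tmp_net != []:
--             list_total_net.append(list_tmp_net)
--     return abs(len(list_total_net[0]) - len(list_total_net[1]))
-- ===== Notes on version B (the rewrite author's own statement) =====
-- stated objective: alternative
-- what changed: The recursive dfs helper is removed: B drives the same exploration with an iterative while-loop over an explicit stack of (node, next-column) frames, popping one frame per step instead of recursing per edge.
import Mathlib
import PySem

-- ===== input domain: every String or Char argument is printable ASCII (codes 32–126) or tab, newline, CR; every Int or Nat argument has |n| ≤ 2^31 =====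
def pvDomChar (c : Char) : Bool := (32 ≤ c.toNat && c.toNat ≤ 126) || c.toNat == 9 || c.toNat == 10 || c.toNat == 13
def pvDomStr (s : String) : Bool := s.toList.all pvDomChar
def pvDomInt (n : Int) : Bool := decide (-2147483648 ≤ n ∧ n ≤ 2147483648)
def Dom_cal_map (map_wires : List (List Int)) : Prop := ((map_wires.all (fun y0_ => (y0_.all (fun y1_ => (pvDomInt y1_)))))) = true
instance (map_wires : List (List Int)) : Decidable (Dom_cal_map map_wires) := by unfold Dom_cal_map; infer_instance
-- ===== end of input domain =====

-- B replaces A's recursive DFS with an iterative worklist loop over an explicit stack of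
-- (node, next-column) frames (same cost, no recursion); both mutate the matrix identically
-- (the theorem is about the return value).


-- ===== PORT A =====
-- shared primitives for the mutated matrix: `pvRow M r` = map_wires[r] (Python raises when
-- r is out of range — those inputs are outside Pre_; the port reads [] there),
-- `pvSet0 row c` = row[c] = 0, `pvZero M r c` = map_wires[r][c] = 0,
-- `pvOnes M` counts the remaining 1-entries (used only as a termination measure / fuel bound).
def pvSet0 : List Int → Nat → List Int
  | [], _ => []
  | _ :: xs, 0 => 0 :: xs
  | x :: xs, n+1 => x :: pvSet0 xs n

def pvZero : List (List Int) → Nat → Nat → List (List Int)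
  | [], _, _ => []
  | row :: rest, 0, c => pvSet0 row c :: rest
  | row :: rest, r+1, c => row :: pvZero rest r c

def pvRow (M : List (List Int)) (r : Nat) : List Int := M.getD r []

def pvOnes (M : List (List Int)) : Nat := (M.map (fun row => row.count 1)).sum

-- A's recursive dfs: scan columns c, c+1, … of row r (bound `len` = range(len(map_wires[r])),
-- computed at entry as in Python); on a 1-entry zero it, record the label, and recurse unless
-- it is a self-loop.  `fuel` bounds only the recursion depth; cal_map passes pvOnes M + 1,
-- which is proved sufficient (each recursive call consumes a 1-entry), so the fuel-0 branch
-- is unreachable on every input.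
def dfsA (fuel : Nat) (M : List (List Int)) (r : Nat) (len : Nat) (c : Nat)
    (tmp : List Int) : (List (List Int)) × List Int :=
  if h : c < len then
    if (pvRow M r).getD c 0 = 1 then
      let M1 := pvZero M r c
      let tmp1 := if ((c : Int) + 1) ∈ tmp then tmp else tmp ++ [(c : Int) + 1]
      if c ≠ r then
        match fuel with
        | 0 => (M1, tmp1)
        | f+1 =>
          let p := dfsA f M1 c (pvRow M1 c).length 0 tmp1
          dfsA (f+1) p.1 r len (c+1) p.2
      else dfsA fuel M1 r len (c+1) tmp1
    else dfsA fuel M r len (c+1) tmp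
  else (M, tmp)
termination_by (fuel, len - c)
decreasing_by
  · exact Prod.Lex.left _ _ (Nat.lt_succ_self f)
  · exact Prod.Lex.right _ (by omega)
  · exact Prod.Lex.right _ (by omega)
  · exact Prod.Lex.right _ (by omega)

def cal_map (map_wires : List (List Int)) : Int :=
  let fin := (List.range map_wires.length).foldl
    (fun (st : (List (List Int)) × List (List Int)) (r : Nat) =>
      let p := dfsA (pvOnes st.1 + 1) st.1 r (pvRow st.1 r).length 0 []
      (p.1, if p.2 = [] then st.2 else st.2 ++ [p.2]))
    (map_wires, [])
  -- abs(len(list_total_net[0]) - len(list_total_net[1])); Python raises IndexError when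
  -- fewer than two components exist — excluded by Pre_, the port reads [] there
  ((((fin.2.getD 0 []).length : Int) - ((fin.2.getD 1 []).length : Int)).natAbs : Int)


-- termination lemmas cited by loopB's decreasing_by: zeroing a 1-entry lowers pvOnes
theorem pvSet0_count (row : List Int) (c : Nat) (h : row.getD c 0 = 1) :
    (pvSet0 row c).count 1 < row.count 1 := by
  induction row generalizing c with
  | nil => simp at h
  | cons x xs ih =>
    cases c with
    | zero =>
      simp at h
      subst h
      simp [pvSet0]
    | succ c' =>
      simp at h
      have := ih c' h
      simp [pvSet0, List.count_cons]
      omega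

theorem pvZero_ones (M : List (List Int)) (r c : Nat)
    (h : (pvRow M r).getD c 0 = 1) : pvOnes (pvZero M r c) < pvOnes M := by
  induction M generalizing r with
  | nil => simp [pvRow] at h
  | cons row rest ih =>
    cases r with
    | zero =>
      simp only [pvRow, List.getD] at h
      have := pvSet0_count row c (by simpa using h)
      simp [pvZero, pvOnes]
      omega
    | succ r' =>
      have := ih r' (by simpa [pvRow] using h)
      simp [pvZero, pvOnes] at this ⊢
      omega

-- ===== PORT B =====
-- termination measure helper for the worklist loop: pending cells of the stacked frames
def pvSig (M : List (List Int)) (S : List (Nat × Nat)) : Nat :=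
  (S.map (fun f => (pvRow M f.1).length - f.2)).sum

-- B's while-loop: pop a (node, next-column) frame and process one cell
def loopB (M : List (List Int)) (S : List (Nat × Nat)) (tmp : List Int) :
    (List (List Int)) × List Int :=
  match S with
  | [] => (M, tmp)
  | (node, col) :: rest =>
    if hcol : col < (pvRow M node).length then
      if (pvRow M node).getD col 0 = 1 then
        let M1 := pvZero M node col
        let tmp1 := if ((col : Int) + 1) ∈ tmp then tmp else tmp ++ [(col : Int) + 1]
        if col ≠ node then
          loopB M1 ((col, 0) :: (node, col + 1) :: rest) tmp1
        else
          loopB M1 ((node, col + 1) :: rest) tmp1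
      else loopB M ((node, col + 1) :: rest) tmp
    else loopB M rest tmp
termination_by (pvOnes M, pvSig M S, S.length)
decreasing_by
  · exact Prod.Lex.left _ _ (pvZero_ones M node col ‹(pvRow M node).getD col 0 = 1›)
  · exact Prod.Lex.left _ _ (pvZero_ones M node col ‹(pvRow M node).getD col 0 = 1›)
  · apply Prod.Lex.right
    apply Prod.Lex.left
    simp only [pvSig, List.map_cons, List.sum_cons]
    omega
  · apply Prod.Lex.right
    have h0 : (pvRow M node).length - col = 0 := by omega
    simp only [pvSig, List.map_cons, List.sum_cons, h0, Nat.zero_add]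
    exact Prod.Lex.right _ (Nat.lt_succ_self _)

def cal_map_alt (map_wires : List (List Int)) : Int :=
  let fin := (List.range map_wires.length).foldl
    (fun (st : (List (List Int)) × List (List Int)) (r : Nat) =>
      let p := loopB st.1 [(r, 0)] []
      (p.1, if p.2 = [] then st.2 else st.2 ++ [p.2]))
    (map_wires, [])
  ((((fin.2.getD 0 []).length : Int) - ((fin.2.getD 1 []).length : Int)).natAbs : Int)

-- ===== PRECONDITION & SPEC =====
-- graph helpers for Pre_ (independent of the ports): pvClosure M r = nodes reachable from r
-- along 1-entries, pvComps M = number of components A's outer loop discovers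
def pvClosureStep (M : List (List Int)) (W : List Nat) : List Nat :=
  W ++ (List.range M.length).filter
    (fun c => (!(W.contains c)) && W.any (fun x => (pvRow M x).getD c 0 == 1))

def pvClosure (M : List (List Int)) (r : Nat) : List Nat :=
  (pvClosureStep M)^[M.length] [r]

def pvComps (M : List (List Int)) : Nat :=
  ((List.range M.length).foldl
    (fun (st : List Nat × Nat) r =>
      if st.1.contains r then st
      else if (pvRow M r).any (fun v => v == 1) then (st.1 ++ pvClosure M r, st.2 + 1)
      else st)
    ([], 0)).2

-- Pre_ = exactly the inputs on which Python A returns: every 1-entry points at an existing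
-- row (otherwise the dfs recursion hits map_wires[idx_col] with idx_col out of range:
-- IndexError), and the graph has at least two components with an edge (otherwise the final
-- list_total_net[1] raises IndexError).  Both excluded input classes make A (and B) raise.
def Pre_cal_map (map_wires : List (List Int)) : Prop :=
  (∀ r ∈ List.range map_wires.length, ∀ c ∈ List.range (pvRow map_wires r).length,
      (pvRow map_wires r).getD c 0 = 1 → c < map_wires.length) ∧
  2 ≤ pvComps map_wires
instance (map_wires : List (List Int)) : Decidable (Pre_cal_map map_wires) := by
  unfold Pre_cal_map; infer_instance

def pvWitness_cal_map : List (List Int) := [[0, 1, 0], [1, 0, 0], [0, 0, 1]]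

def Spec_cal_map (map_wires : List (List Int)) (out : Int) : Prop := out = cal_map_alt map_wires
instance (map_wires : List (List Int)) (out : Int) : Decidable (Spec_cal_map map_wires out) := by unfold Spec_cal_map; infer_instance

-- ===== CLAIM (what is proved, stated in full; the proofs are below) =====
def Claim_equal_cal_map : Prop := ∀ (map_wires : List (List Int)), Dom_cal_map map_wires → Pre_cal_map map_wires → Spec_cal_map map_wires (cal_map map_wires)

-- ===== LEMMAS AND PROOFS =====

theorem pvSet0_length (row : List Int) (c : Nat) : (pvSet0 row c).length = row.length := by
  induction row generalizing c with
  | nil => simp [pvSet0]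
  | cons x xs ih => cases c <;> simp [pvSet0, ih]

theorem pvZero_row_length (M : List (List Int)) (r c x : Nat) :
    (pvRow (pvZero M r c) x).length = (pvRow M x).length := by
  induction M generalizing r x with
  | nil => simp [pvZero]
  | cons row rest ih =>
    cases r with
    | zero => cases x <;> simp [pvZero, pvRow, pvSet0_length]
    | succ r' =>
      cases x with
      | zero => simp [pvZero, pvRow]
      | succ x' => simpa [pvZero, pvRow] using ih r' x'



theorem dfsA_ones (fuel : Nat) (M : List (List Int)) (r len c : Nat) (tmp : List Int) :
    pvOnes (dfsA fuel M r len c tmp).1 ≤ pvOnes M := by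
  fun_induction dfsA fuel M r len c tmp with
  | case1 M r len c tmp h h1 M1 tmp1 hcr =>
    exact (pvZero_ones M r c h1).le
  | case2 M r len c tmp h h1 M1 tmp1 hcr f p ih3 ih2 ih1 =>
    exact le_trans ih1 (le_trans ih3 (pvZero_ones M r c h1).le)
  | case3 fuel M r len c tmp h h1 M1 tmp1 hcr ih1 =>
    exact le_trans ih1 (pvZero_ones M r c h1).le
  | case4 fuel M r len c tmp h h1 ih1 => exact ih1
  | case5 fuel M r len c tmp h => exact le_rfl

theorem dfsA_row_length (fuel : Nat) (M : List (List Int)) (r len c : Nat) (tmp : List Int)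
    (x : Nat) : (pvRow (dfsA fuel M r len c tmp).1 x).length = (pvRow M x).length := by
  fun_induction dfsA fuel M r len c tmp with
  | case1 M r len c tmp h h1 M1 tmp1 hcr =>
    exact pvZero_row_length M r c x
  | case2 M r len c tmp h h1 M1 tmp1 hcr f p ih3 ih2 ih1 =>
    exact ih1.trans (ih3.trans (pvZero_row_length M r c x))
  | case3 fuel M r len c tmp h h1 M1 tmp1 hcr ih1 =>
    exact ih1.trans (pvZero_row_length M r c x)
  | case4 fuel M r len c tmp h h1 ih1 => exact ih1
  | case5 fuel M r len c tmp h => rfl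

-- the simulation: running B's loop on a stacked frame (r, c) equals running A's dfs on
-- row r from column c first (with adequate fuel), then the rest of the stack
theorem sim (fuel : Nat) (M : List (List Int)) (r len c : Nat) (tmp : List Int) :
    pvOnes M < fuel → len = (pvRow M r).length → ∀ S : List (Nat × Nat),
    loopB M ((r, c) :: S) tmp
      = loopB (dfsA fuel M r len c tmp).1 S (dfsA fuel M r len c tmp).2 := by
  fun_induction dfsA fuel M r len c tmp with
  | case1 M r len c tmp h h1 M1 tmp1 hcr =>
    intro hf _ _
    omega
  | case2 M r len c tmp h h1 M1 tmp1 hcr f p ih3 ih2 ih1 =>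
    intro hf hlen S
    have hz1 : pvOnes M1 < pvOnes M := pvZero_ones M r c h1
    have hones : pvOnes p.1 ≤ pvOnes M1 := dfsA_ones f M1 c (pvRow M1 c).length 0 tmp1
    have hlen1 : (pvRow p.1 r).length = (pvRow M1 r).length :=
      dfsA_row_length f M1 c (pvRow M1 c).length 0 tmp1 r
    have hMl : (pvRow M1 r).length = (pvRow M r).length := pvZero_row_length M r c r
    have hc' : c < (pvRow M r).length := hlen ▸ h
    rw [loopB, dif_pos hc', if_pos h1, if_pos hcr]
    exact (ih3 (by omega) rfl ((r, c + 1) :: S)).trans (ih1 (by omega) (by omega) S)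
  | case3 fuel M r len c tmp h h1 M1 tmp1 hcr ih1 =>
    intro hf hlen S
    have hz1 : pvOnes M1 < pvOnes M := pvZero_ones M r c h1
    have hcr' : c = r := not_not.mp hcr
    subst hcr'
    have hMl : (pvRow M1 c).length = (pvRow M c).length := pvZero_row_length M c c c
    have hc' : c < (pvRow M c).length := hlen ▸ h
    rw [loopB, dif_pos hc', if_pos h1, if_neg (show ¬(c ≠ c) by simp)]
    exact ih1 (by omega) (by omega) S
  | case4 fuel M r len c tmp h h1 ih1 =>
    intro hf hlen S
    have hc' : c < (pvRow M r).length := hlen ▸ h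
    rw [loopB, dif_pos hc', if_neg h1]
    exact ih1 hf hlen S
  | case5 fuel M r len c tmp h =>
    intro hf hlen S
    rw [loopB, dif_neg (by omega)]

theorem step_eq (st : (List (List Int)) × List (List Int)) (r : Nat) :
    loopB st.1 [(r, 0)] [] = dfsA (pvOnes st.1 + 1) st.1 r (pvRow st.1 r).length 0 [] := by
  rw [sim (pvOnes st.1 + 1) st.1 r (pvRow st.1 r).length 0 [] (Nat.lt_succ_self _) rfl []]
  rw [loopB]

theorem cal_map_eq_alt (map_wires : List (List Int)) :
    cal_map map_wires = cal_map_alt map_wires := by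
  simp only [cal_map, cal_map_alt, step_eq]

-- ===== VERDICT (by name: the statement is the Claim_ definition above) =====
theorem cal_map_spec : Claim_equal_cal_map := by
  intro map_wires _ _
  unfold Spec_cal_map
  exact cal_map_eq_alt map_wires
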